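-- pv_equiv track=rewrite | github.com/Timur-Nasibullin/EGE | 22/28556.py | f
-- ===== SOURCE A (Python) =====
-- def f(x):
--     a = 0
--     b = 0
--     while x > 0:
--         a += x % 8
--         b += 1
--         x = x // 8
--     return a * b
-- ===== SOURCE B (Python) =====
-- def f(x):
--     if x <= 0:
--         return 0
--     d = oct(x)[2:]
--     return sum(int(c) for c in d) * len(d)
-- ===== Notes on version B (the rewrite author's own statement) =====
-- stated objective: idiomatic
-- what changed: Replaces the interleaved while-loop accumulating digit sum and count with building the full octal string via oct() and one aggregating pass (sum of its digits times its length).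
import Mathlib
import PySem

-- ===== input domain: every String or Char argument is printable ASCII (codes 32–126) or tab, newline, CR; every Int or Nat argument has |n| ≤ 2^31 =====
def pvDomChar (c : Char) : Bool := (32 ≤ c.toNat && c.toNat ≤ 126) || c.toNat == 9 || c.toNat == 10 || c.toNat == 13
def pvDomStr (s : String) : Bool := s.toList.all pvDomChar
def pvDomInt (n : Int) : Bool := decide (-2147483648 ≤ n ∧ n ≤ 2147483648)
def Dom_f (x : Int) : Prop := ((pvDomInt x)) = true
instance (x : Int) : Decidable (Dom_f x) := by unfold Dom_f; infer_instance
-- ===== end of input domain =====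

-- B builds the octal digit string first, then aggregates in one pass; A interleaves extraction and accumulation in one arithmetic loop. Return values proved equal for every Int.

-- ===== PORT A =====
-- the while loop of A, with state (x, a, b)
def fLoop (x a b : Int) : Int :=
  if x > 0 then fLoop (PySem.Int.floordiv x 8) (a + PySem.Int.mod x 8) (b + 1) else a * b
termination_by x.toNat
decreasing_by
  rename_i h
  rw [PySem.Int.floordiv_eq_ediv_of_pos (by omega)]
  omega

def f (x : Int) : Int := fLoop x 0 0

-- ===== PORT B =====
-- oct(x)[2:] as the list of octal digits, most significant first (n > 0)
def octDigits (n : Nat) : List Nat :=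
  if n = 0 then [] else octDigits (n / 8) ++ [n % 8]

def f_alt (x : Int) : Int :=
  if x ≤ 0 then 0
  else
    let d := octDigits x.toNat
    (d.map (fun c => (c : Int))).sum * d.length

-- ===== PRECONDITION & SPEC =====
def Spec_f (x : Int) (out : Int) : Prop := out = f_alt x
instance (x : Int) (out : Int) : Decidable (Spec_f x out) := by unfold Spec_f; infer_instance

-- ===== CLAIM (what is proved, stated in full; the proofs are below) =====
def Claim_equal_f : Prop := ∀ (x : Int), Dom_f x → Spec_f x (f x)

-- ===== LEMMAS AND PROOFS =====

theorem octDigits_pos (n : Nat) (h : n ≠ 0) :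
    octDigits n = octDigits (n / 8) ++ [n % 8] := by
  rw [octDigits]; simp [h]

theorem fLoop_eq (n : Nat) : ∀ a b : Int,
    fLoop (n : Int) a b
      = (a + ((octDigits n).map (fun c => (c : Int))).sum) * (b + (octDigits n).length) := by
  induction n using Nat.strong_induction_on with
  | _ n ih =>
    intro a b
    by_cases h : n = 0
    · subst h
      rw [fLoop, octDigits]
      simp
    · rw [fLoop]
      have hpos : (0 : Int) < (n : Int) := by exact_mod_cast Nat.pos_of_ne_zero h
      rw [if_pos hpos]
      have hfd : PySem.Int.floordiv (n : Int) 8 = ((n / 8 : Nat) : Int) := by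
        exact_mod_cast PySem.Int.floordiv_natCast n 8
      have hmd : PySem.Int.mod (n : Int) 8 = ((n % 8 : Nat) : Int) := by
        exact_mod_cast PySem.Int.mod_natCast n 8
      rw [hfd, hmd, ih (n / 8) (Nat.div_lt_self (Nat.pos_of_ne_zero h) (by omega)),
        octDigits_pos n h]
      simp
      ring

-- ===== VERDICT (by name: the statement is the Claim_ definition above) =====
theorem f_spec : Claim_equal_f := by
  intro x _
  unfold Spec_f f f_alt
  by_cases h : x ≤ 0
  · rw [fLoop]
    simp [h, not_lt.mpr h]
  · have hx : ((x.toNat : Int)) = x := Int.toNat_of_nonneg (by omega)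
    have : fLoop x 0 0 = fLoop ((x.toNat : Int)) 0 0 := by rw [hx]
    rw [if_neg h, this, fLoop_eq]
    simp
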